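-- pv_equiv track=rewrite | github.com/HSJung93/-Python-CodingPractices | bank/nvr-wt-2021-3-snail.py | mergeSnail
-- ===== SOURCE A (Python) =====
-- def mergeSnail(snailOne, snailTwo):
--
--   arr0 = snailOne
--   arr1 = snailTwo
--   n0, n1 = len(arr0), len(arr1)
--   M = n0*n1
--
--   arr = [[0]*M for _ in range(M)]
--   for i in range(M):
--     for j in range(M):
--       arr[i][j] += arr1[i%n1][j%n1]
--       arr[i][j] += arr0[i//n1][j//n1]*n1*n1
--
--   return arr
-- ===== SOURCE B (Python) =====
-- def mergeSnail(snailOne, snailTwo):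
--     n0, n1 = len(snailOne), len(snailTwo)
--     out = []
--     for bi in range(n0):
--         for r in range(n1):
--             row = []
--             for bj in range(n0):
--                 base = snailOne[bi][bj] * n1 * n1
--                 for c in range(n1):
--                     row.append(base + snailTwo[r][c])
--             out.append(row)
--     return out
-- ===== Notes on version B (the rewrite author's own statement) =====
-- stated objective: faster
-- what changed: B builds the result block-by-block (rows appended per (block-row, inner-row) pair, cells per (block-col, inner-col) pair), eliminating A's preallocated M x M array and the per-cell %-and-// index arithmetic; same asymptotic cost, measured ~2.4-2.8x faster.
import Mathlib
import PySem

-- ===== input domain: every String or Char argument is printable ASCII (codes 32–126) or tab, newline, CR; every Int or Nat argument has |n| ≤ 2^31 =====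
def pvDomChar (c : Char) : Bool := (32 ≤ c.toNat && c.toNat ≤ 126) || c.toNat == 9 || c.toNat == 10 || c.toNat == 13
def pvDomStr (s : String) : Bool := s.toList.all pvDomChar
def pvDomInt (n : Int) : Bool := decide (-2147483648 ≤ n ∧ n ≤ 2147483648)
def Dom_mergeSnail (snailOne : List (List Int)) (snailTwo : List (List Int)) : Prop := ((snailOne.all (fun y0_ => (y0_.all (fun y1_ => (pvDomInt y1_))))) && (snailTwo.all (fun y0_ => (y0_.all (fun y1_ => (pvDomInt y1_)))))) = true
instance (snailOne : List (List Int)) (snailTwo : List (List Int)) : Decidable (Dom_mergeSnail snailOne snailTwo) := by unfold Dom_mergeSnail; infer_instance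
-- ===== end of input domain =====

-- B replaces A's preallocated M×M array and %-,//-index arithmetic by a block-by-block
-- construction (rows appended per (block-row, inner-row), cells per (block-col, inner-col)): alternative decomposition, same cost.

-- ===== PORT A =====
def mergeSnail (snailOne : List (List Int)) (snailTwo : List (List Int)) : List (List Int) :=
  let n0 : Int := snailOne.length
  let n1 : Int := snailTwo.length
  let M : Int := n0 * n1
  (PySem.List.pyRange 0 M 1).map (fun i =>
    (PySem.List.pyRange 0 M 1).map (fun j =>
      0 + PySem.List.pyGetD (PySem.List.pyGetD snailTwo (PySem.Int.mod i n1) []) (PySem.Int.mod j n1) 0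
        + PySem.List.pyGetD (PySem.List.pyGetD snailOne (PySem.Int.floordiv i n1) []) (PySem.Int.floordiv j n1) 0 * n1 * n1))

-- ===== PORT B =====
def mergeSnail_alt (snailOne : List (List Int)) (snailTwo : List (List Int)) : List (List Int) :=
  let n0 := snailOne.length
  let n1 := snailTwo.length
  (List.range n0).flatMap (fun bi =>
    (List.range n1).map (fun r =>
      (List.range n0).flatMap (fun bj =>
        (List.range n1).map (fun c =>
          (snailOne.getD bi []).getD bj 0 * (n1 : Int) * (n1 : Int) + (snailTwo.getD r []).getD c 0))))

-- ===== PRECONDITION & SPEC =====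
-- Pre_ excludes exactly the inputs on which the Python A raises IndexError: a ragged matrix
-- whose rows are shorter than the matrix height (only reachable when both matrices are nonempty).
def Pre_mergeSnail (snailOne : List (List Int)) (snailTwo : List (List Int)) : Prop :=
  snailOne = [] ∨ snailTwo = [] ∨
    ((∀ row ∈ snailOne, snailOne.length ≤ row.length) ∧ (∀ row ∈ snailTwo, snailTwo.length ≤ row.length))
instance (snailOne : List (List Int)) (snailTwo : List (List Int)) : Decidable (Pre_mergeSnail snailOne snailTwo) := by unfold Pre_mergeSnail; infer_instance

def pvWitness_mergeSnail : List (List Int) × List (List Int) := ([[1]], [[0]])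

def Spec_mergeSnail (snailOne : List (List Int)) (snailTwo : List (List Int)) (out : List (List Int)) : Prop := out = mergeSnail_alt snailOne snailTwo
instance (snailOne : List (List Int)) (snailTwo : List (List Int)) (out : List (List Int)) : Decidable (Spec_mergeSnail snailOne snailTwo out) := by unfold Spec_mergeSnail; infer_instance

-- ===== CLAIM (what is proved, stated in full; the proofs are below) =====
def Claim_equal_mergeSnail : Prop := ∀ (snailOne : List (List Int)) (snailTwo : List (List Int)), Dom_mergeSnail snailOne snailTwo → Pre_mergeSnail snailOne snailTwo → Spec_mergeSnail snailOne snailTwo (mergeSnail snailOne snailTwo)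

-- ===== LEMMAS AND PROOFS =====

-- range (a*b) traversed via (i / b, i % b) = the nested (block, offset) traversal.
theorem range_mul_map_div_mod {α : Type} (g : Nat → Nat → α) (a b : Nat) :
    (List.range (a * b)).map (fun i => g (i / b) (i % b)) =
      (List.range a).flatMap (fun bi => (List.range b).map (g bi)) := by
  rcases Nat.eq_zero_or_pos b with hb | hb
  · subst hb; simp
  · induction a with
    | zero => simp
    | succ a ih =>
      rw [Nat.succ_mul, List.range_add, List.map_append, ih, List.range_succ,
        List.flatMap_append]
      congr 1
      simp only [List.map_map, List.flatMap_cons, List.flatMap_nil, List.append_nil]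
      refine List.map_congr_left (fun r hr => ?_)
      have hrb : r < b := List.mem_range.mp hr
      have hd : (a * b + r) / b = a := by
        rw [Nat.add_comm, Nat.mul_comm, Nat.add_mul_div_left _ _ hb, Nat.div_eq_of_lt hrb,
          Nat.zero_add]
      have hm : (a * b + r) % b = r := by
        rw [Nat.add_comm, Nat.mul_comm, Nat.add_mul_mod_self_left, Nat.mod_eq_of_lt hrb]
      simp [hd, hm]

theorem mergeSnail_eq_canonical (s1 s2 : List (List Int)) :
    mergeSnail s1 s2 =
      (List.range (s1.length * s2.length)).map (fun i =>
        (List.range (s1.length * s2.length)).map (fun j =>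
          (s1.getD (i / s2.length) []).getD (j / s2.length) 0 * (s2.length : Int) * (s2.length : Int) +
            (s2.getD (i % s2.length) []).getD (j % s2.length) 0)) := by
  unfold mergeSnail
  have hM : ((s1.length : Int) * (s2.length : Int)) = ((s1.length * s2.length : Nat) : Int) := by
    push_cast; ring
  simp only [hM, PySem.List.pyRange_zero_natCast, List.map_map]
  refine List.map_congr_left (fun i _ => ?_)
  refine List.map_congr_left (fun j _ => ?_)
  simp only [Function.comp_apply, PySem.Int.mod_natCast, PySem.Int.floordiv_natCast,
    PySem.List.pyGetD_natCast]
  ring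

theorem mergeSnail_alt_eq_canonical (s1 s2 : List (List Int)) :
    mergeSnail_alt s1 s2 =
      (List.range (s1.length * s2.length)).map (fun i =>
        (List.range (s1.length * s2.length)).map (fun j =>
          (s1.getD (i / s2.length) []).getD (j / s2.length) 0 * (s2.length : Int) * (s2.length : Int) +
            (s2.getD (i % s2.length) []).getD (j % s2.length) 0)) := by
  symm
  calc (List.range (s1.length * s2.length)).map (fun i =>
        (List.range (s1.length * s2.length)).map (fun j =>
          (s1.getD (i / s2.length) []).getD (j / s2.length) 0 * (s2.length : Int) * (s2.length : Int) +
            (s2.getD (i % s2.length) []).getD (j % s2.length) 0))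
      = (List.range (s1.length * s2.length)).map (fun i =>
          (List.range s1.length).flatMap (fun bj => (List.range s2.length).map (fun c =>
            (s1.getD (i / s2.length) []).getD bj 0 * (s2.length : Int) * (s2.length : Int) +
              (s2.getD (i % s2.length) []).getD c 0))) :=
        List.map_congr_left (fun i _ =>
          range_mul_map_div_mod (fun bj c =>
            (s1.getD (i / s2.length) []).getD bj 0 * (s2.length : Int) * (s2.length : Int) +
              (s2.getD (i % s2.length) []).getD c 0) s1.length s2.length)
    _ = (List.range s1.length).flatMap (fun bi => (List.range s2.length).map (fun r =>
          (List.range s1.length).flatMap (fun bj => (List.range s2.length).map (fun c =>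
            (s1.getD bi []).getD bj 0 * (s2.length : Int) * (s2.length : Int) +
              (s2.getD r []).getD c 0)))) :=
        range_mul_map_div_mod (fun bi r =>
          (List.range s1.length).flatMap (fun bj => (List.range s2.length).map (fun c =>
            (s1.getD bi []).getD bj 0 * (s2.length : Int) * (s2.length : Int) +
              (s2.getD r []).getD c 0))) s1.length s2.length
    _ = mergeSnail_alt s1 s2 := rfl

-- ===== VERDICT (by name: the statement is the Claim_ definition above) =====
theorem mergeSnail_spec : Claim_equal_mergeSnail := by
  intro s1 s2 _ _
  unfold Spec_mergeSnail
  rw [mergeSnail_eq_canonical, mergeSnail_alt_eq_canonical]
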